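-- pv_equiv track=rewrite | github.com/Shawn0604/WeHelp-Assignments | week3/task1.py | group_spots_by_mrt
-- ===== SOURCE A (Python) =====
-- def group_spots_by_mrt(spots):
--     mrt_group = {}
--
--     for spot in spots:
--         mrt = spot["MRT"]
--         if mrt not in mrt_group:
--             mrt_group[mrt] = []
--         mrt_group[mrt].append(spot["stitle"])
--     return mrt_group
-- ===== SOURCE B (Python) =====
-- def group_spots_by_mrt(spots):
--     # Two-pass: first collect the distinct MRT keys in first-occurrence order,
--     # then build each group by filtering the whole list once per key.
--     keys = list(dict.fromkeys(spot["MRT"] for spot in spots))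
--     return {m: [spot["stitle"] for spot in spots if spot["MRT"] == m] for m in keys}
-- ===== Notes on version B (the rewrite author's own statement) =====
-- stated objective: alternative
-- what changed: A builds the dict in one incremental pass, appending each title as it goes; B first dedups the MRT keys in first-occurrence order, then builds each group with a filter pass over the whole list per key.
import Mathlib
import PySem

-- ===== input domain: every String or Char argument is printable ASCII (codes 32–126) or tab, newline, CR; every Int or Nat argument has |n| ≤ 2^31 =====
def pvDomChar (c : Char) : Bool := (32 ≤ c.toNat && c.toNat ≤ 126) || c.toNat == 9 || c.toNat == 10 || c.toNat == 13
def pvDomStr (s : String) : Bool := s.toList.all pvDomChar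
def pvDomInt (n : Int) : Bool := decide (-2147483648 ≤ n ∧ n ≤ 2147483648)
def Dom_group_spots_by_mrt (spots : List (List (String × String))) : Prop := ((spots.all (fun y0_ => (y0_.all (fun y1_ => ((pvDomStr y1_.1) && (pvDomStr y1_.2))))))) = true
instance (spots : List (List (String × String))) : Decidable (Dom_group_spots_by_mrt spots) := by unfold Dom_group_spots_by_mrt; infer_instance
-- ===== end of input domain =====

-- B replaces A's single-pass incremental dict grouping by dedup-the-keys then one filter pass per key; same result, alternative structure (not faster).


-- spot["MRT"] / spot["stitle"]: first-match lookup in the association list (Python dict access);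
-- the '.getD ""' default is never reached inside Pre_ (both keys present).
def pvMrt (spot : List (String × String)) : String := ((PySem.Dict.mk spot).get? "MRT").getD ""
def pvStitle (spot : List (String × String)) : String := ((PySem.Dict.mk spot).get? "stitle").getD ""

-- ===== PORT A =====
def group_spots_by_mrt (spots : List (List (String × String))) : List (String × List String) :=
  (spots.foldl (fun mrt_group spot =>
      let mrt := pvMrt spot
      let mrt_group := if mrt_group.contains mrt then mrt_group else mrt_group.insert mrt []
      mrt_group.modify mrt [] (· ++ [pvStitle spot]))
    PySem.Dict.empty).items

-- ===== PORT B =====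
def group_spots_by_mrt_alt (spots : List (List (String × String))) : List (String × List String) :=
  (PySem.List.dedup (spots.map pvMrt)).map
    (fun m => (m, (spots.filter (fun spot => pvMrt spot == m)).map pvStitle))

-- ===== PRECONDITION & SPEC =====
-- A raises KeyError when a spot lacks "MRT" or "stitle"; Pre_ requires both keys present in every spot.
def Pre_group_spots_by_mrt (spots : List (List (String × String))) : Prop :=
  ∀ spot ∈ spots, ((PySem.Dict.mk spot).get? "MRT").isSome ∧ ((PySem.Dict.mk spot).get? "stitle").isSome
instance (spots : List (List (String × String))) : Decidable (Pre_group_spots_by_mrt spots) := by unfold Pre_group_spots_by_mrt; infer_instance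

def pvWitness_group_spots_by_mrt : (List (List (String × String))) :=
  [[("MRT", "Tamsui"), ("stitle", "Old Street")], [("MRT", "Tamsui"), ("stitle", "Fort")]]

def Spec_group_spots_by_mrt (spots : List (List (String × String))) (out : List (String × List String)) : Prop := out = group_spots_by_mrt_alt spots
instance (spots : List (List (String × String))) (out : List (String × List String)) : Decidable (Spec_group_spots_by_mrt spots out) := by unfold Spec_group_spots_by_mrt; infer_instance

-- ===== CLAIM (what is proved, stated in full; the proofs are below) =====
def Claim_equal_group_spots_by_mrt : Prop := ∀ (spots : List (List (String × String))), Dom_group_spots_by_mrt spots → Pre_group_spots_by_mrt spots → Spec_group_spots_by_mrt spots (group_spots_by_mrt spots)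

-- ===== LEMMAS AND PROOFS =====

-- A's body: 'if absent insert []' followed by append is one 'modify'.
theorem pv_step_eq (d : PySem.Dict String (List String)) (m t : String) :
    ((if d.contains m then d else d.insert m []).modify m [] (· ++ [t]))
      = d.modify m [] (· ++ [t]) := by
  by_cases h : d.contains m = true
  · simp [h]
  · have h' : d.contains m = false := by simpa using h
    rw [h']
    simp only [Bool.false_eq_true, if_false, PySem.Dict.modify, PySem.Dict.getD_insert_self,
      PySem.Dict.insert_insert_self, PySem.Dict.getD_of_not_contains d [] h']

theorem group_spots_by_mrt_spec' (spots : List (List (String × String))) :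
    group_spots_by_mrt spots = group_spots_by_mrt_alt spots := by
  unfold group_spots_by_mrt group_spots_by_mrt_alt
  have hstep : spots.foldl (fun mrt_group spot =>
      let mrt := pvMrt spot
      let mrt_group := if mrt_group.contains mrt then mrt_group else mrt_group.insert mrt []
      mrt_group.modify mrt [] (· ++ [pvStitle spot])) PySem.Dict.empty
      = (spots.map (fun s => (pvMrt s, pvStitle s))).foldl
          (fun d p => d.modify p.1 [] (· ++ [p.2])) PySem.Dict.empty := by
    rw [List.foldl_map]
    exact PySem.List.foldl_congr_mem spots _ _ _ (fun d s _ => pv_step_eq d (pvMrt s) (pvStitle s))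
  rw [hstep]
  set pairs := spots.map (fun s => (pvMrt s, pvStitle s)) with hpairs
  have hnd : ((pairs.foldl (fun d p => d.modify p.1 [] (· ++ [p.2])) PySem.Dict.empty).keys).Nodup := by
    exact PySem.Dict.nodup_keys_foldl_modify_key pairs (fun p => p.1) []
      (fun d p => (· ++ [p.2])) PySem.Dict.empty (by simp [PySem.Dict.keys_empty])
  rw [PySem.Dict.items_eq_map_keys _ hnd []]
  have hkeys : (pairs.foldl (fun d p => d.modify p.1 [] (· ++ [p.2])) PySem.Dict.empty).keys
      = PySem.List.dedup (spots.map pvMrt) := by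
    rw [PySem.Dict.keys_foldl_modify_key pairs (fun p => p.1) [] (fun d p => (· ++ [p.2]))]
    simp [PySem.Dict.keys_empty, PySem.Set.update, PySem.List.dedup_eq_ofList,
      PySem.Set.ofList_eq_foldl, hpairs, List.map_map, Function.comp_def]
  rw [hkeys]
  apply List.map_congr_left
  intro m _
  rw [PySem.Dict.getD_foldl_modify_append]
  simp [PySem.Dict.getD_empty, hpairs, List.filter_map, List.map_map, Function.comp_def]

-- ===== VERDICT (by name: the statement is the Claim_ definition above) =====
theorem group_spots_by_mrt_spec : Claim_equal_group_spots_by_mrt := by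
  intro spots _ _
  exact group_spots_by_mrt_spec' spots
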